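-- pv_equiv track=rewrite | github.com/ThanilkaUdugama/RPS | RPS.py | choose_option
-- ===== SOURCE A (Python) =====
-- def calculate_shows(stream, lookfor):
--     count = 0
--     for i in range(len(lookfor), len(stream) + 1):
--         word = "".join(stream[i - len(lookfor): i])
--
--         if word == lookfor:
--             count += 1
--
--     return count
--
-- def choose_option(stream, lookup_len):
--     last_steps = "".join(stream[-(lookup_len):])
--     counter_actions = {"R": "P", "P": "S", "S": "R"}
--
--     guesses = ["R", "P", "S"]
--     guess_data = ['', -1]
--     for guess in guesses:
--         result = calculate_shows(stream, last_steps + guess)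
--
--         if result > guess_data[1]:
--             guess_data[1] = result
--             guess_data[0] = guess
--
--     return counter_actions[guess_data[0]]
-- ===== SOURCE B (Python) =====
-- def choose_option(stream, lookup_len):
--     last_steps = "".join(stream[-lookup_len:])
--     n = len(last_steps)
--     w = n + 1
--     counts = {"R": 0, "P": 0, "S": 0}
--     for i in range(w, len(stream) + 1):
--         word = "".join(stream[i - w:i])
--         if word.startswith(last_steps):
--             tail = word[n:]
--             if tail in counts:
--                 counts[tail] += 1
--     best = max(counts, key=counts.get)
--     return {"R": "P", "P": "S", "S": "R"}[best]
-- ===== Notes on version B (the rewrite author's own statement) =====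
-- stated objective: alternative
-- what changed: B makes one pass over the stream windows, tallying the character following each occurrence of the recent pattern into an R/P/S counter dict and taking the first-maximal key, instead of A's three separate full scans (one per candidate guess).
import Mathlib
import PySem

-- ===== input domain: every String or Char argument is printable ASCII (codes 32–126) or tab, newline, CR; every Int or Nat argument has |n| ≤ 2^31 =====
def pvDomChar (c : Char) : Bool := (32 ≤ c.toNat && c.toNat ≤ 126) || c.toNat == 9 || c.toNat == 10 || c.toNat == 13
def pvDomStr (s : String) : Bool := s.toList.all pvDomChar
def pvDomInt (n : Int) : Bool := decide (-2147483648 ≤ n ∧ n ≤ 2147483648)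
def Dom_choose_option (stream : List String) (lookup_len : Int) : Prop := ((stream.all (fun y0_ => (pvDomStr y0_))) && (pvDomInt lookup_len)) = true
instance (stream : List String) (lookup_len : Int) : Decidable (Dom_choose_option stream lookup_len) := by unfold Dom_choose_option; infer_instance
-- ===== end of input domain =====

-- B replaces A's three full scans (one per candidate guess) by a single pass that tallies
-- the character following each occurrence of the recent pattern into an R/P/S counter
-- dict and takes the first-maximal key; same result by a different traversal.

-- ===== PORT A =====
def calculate_shows (stream : List String) (lookfor : String) : Int :=
  (PySem.List.pyRange (PySem.Str.len lookfor) ((stream.length : Int) + 1) 1).foldl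
    (fun count i =>
      let word := PySem.Str.join "" (PySem.List.slice stream (some (i - PySem.Str.len lookfor)) (some i))
      if word = lookfor then count + 1 else count) 0

def choose_option (stream : List String) (lookup_len : Int) : String :=
  let last_steps := PySem.Str.join "" (PySem.List.slice stream (some (-lookup_len)) none)
  let counter_actions : PySem.Dict String String := PySem.Dict.ofList [("R", "P"), ("P", "S"), ("S", "R")]
  let guesses := ["R", "P", "S"]
  let guess_data := guesses.foldl (fun gd guess =>
      let result := calculate_shows stream (last_steps ++ guess)
      if result > gd.2 then (guess, result) else gd) (("" : String), (-1 : Int))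
  -- Python's counter_actions[guess_data[0]] could only raise KeyError if the loop never
  -- updated guess_data; it always does (a count is ≥ 0 > -1 on the first guess), so the
  -- "" default of getD is unreachable.
  counter_actions.getD guess_data.1 ""

-- ===== PORT B =====
def choose_option_alt (stream : List String) (lookup_len : Int) : String :=
  let last_steps := PySem.Str.join "" (PySem.List.slice stream (some (-lookup_len)) none)
  let n := PySem.Str.len last_steps
  let w := n + 1
  let counts := (PySem.List.pyRange w ((stream.length : Int) + 1) 1).foldl
    (fun (d : PySem.Dict String Int) i =>
      let word := PySem.Str.join "" (PySem.List.slice stream (some (i - w)) (some i))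
      if PySem.Str.startswith word last_steps then
        let tail := PySem.Str.slice word (some n) none
        if d.contains tail then d.modify tail 0 (· + 1) else d
      else d)
    (PySem.Dict.ofList [("R", (0 : Int)), ("P", 0), ("S", 0)])
  -- Python's max over the (always non-empty) dict keys always returns, and the final
  -- counter lookup is on one of the three keys, so both getD defaults are unreachable.
  let best := (PySem.List.max? counts.keys (fun k => counts.getD k 0)).getD ""
  (PySem.Dict.ofList [("R", "P"), ("P", "S"), ("S", "R")]).getD best ""

-- ===== PRECONDITION & SPEC =====
def Spec_choose_option (stream : List String) (lookup_len : Int) (out : String) : Prop := out = choose_option_alt stream lookup_len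
instance (stream : List String) (lookup_len : Int) (out : String) : Decidable (Spec_choose_option stream lookup_len out) := by unfold Spec_choose_option; infer_instance

-- ===== CLAIM (what is proved, stated in full; the proofs are below) =====
def Claim_equal_choose_option : Prop := ∀ (stream : List String) (lookup_len : Int), Dom_choose_option stream lookup_len → Spec_choose_option stream lookup_len (choose_option stream lookup_len)

-- ===== LEMMAS AND PROOFS =====

-- `s == p + t` in Python is exactly `s starts with p and s[len(p):] == t`.
theorem pv_append_iff (s p t : String) :
    (s = p ++ t) ↔ (PySem.Str.startswith s p = true ∧ PySem.Str.slice s (some (PySem.Str.len p)) none = t) := by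
  have hsl : (PySem.Str.slice s (some (PySem.Str.len p)) none).toList
      = s.toList.drop p.toList.length := by
    rw [PySem.Str.toList_slice, PySem.Chars.slice_eq_listSlice, PySem.Str.len_eq,
      PySem.List.slice_from_natCast]
  have hsw : PySem.Str.startswith s p = true ↔ p.toList <+: s.toList := by
    rw [PySem.Str.startswith_eq, PySem.Chars.startswith_iff]
  rw [← String.toList_inj, hsw, ← String.toList_inj, hsl, String.toList_append]
  constructor
  · intro h; rw [h]; simp
  · rintro ⟨⟨u, h⟩, h2⟩
    rw [← h2, ← h]; simp

theorem pv_eq_append_bool (s p t : String) :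
    (s == p ++ t) = (PySem.Str.startswith s p && (PySem.Str.slice s (some (PySem.Str.len p)) none == t)) := by
  rw [Bool.eq_iff_iff]
  simp only [beq_iff_eq, Bool.and_eq_true]
  exact pv_append_iff s p t

-- A's counting loop is a countP over the same index range.
theorem pv_calc_shows (stream : List String) (lookfor : String) :
    calculate_shows stream lookfor =
      ((PySem.List.pyRange (PySem.Str.len lookfor) ((stream.length : Int) + 1) 1).countP
        (fun i => PySem.Str.join "" (PySem.List.slice stream (some (i - PySem.Str.len lookfor)) (some i)) == lookfor) : Int) := by
  simp only [calculate_shows]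
  rw [show (fun (count : Int) i =>
      let word := PySem.Str.join "" (PySem.List.slice stream (some (i - PySem.Str.len lookfor)) (some i));
      if word = lookfor then count + 1 else count)
    = (fun acc i => if (PySem.Str.join "" (PySem.List.slice stream (some (i - PySem.Str.len lookfor)) (some i)) == lookfor) = true then acc + 1 else acc) from by
      funext c i; simp [beq_iff_eq]]
  rw [PySem.List.foldl_count_if]
  simp

-- A's count for a single-character guess g, phrased as B's window predicate.
theorem pv_countA (stream : List String) (ls g : String) (hg1 : PySem.Str.len g = 1) :
    calculate_shows stream (ls ++ g) =
      ((PySem.List.pyRange (PySem.Str.len ls + 1) ((stream.length : Int) + 1) 1).countP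
        (fun i => PySem.Str.startswith (PySem.Str.join "" (PySem.List.slice stream (some (i - (PySem.Str.len ls + 1))) (some i))) ls
          && (PySem.Str.slice (PySem.Str.join "" (PySem.List.slice stream (some (i - (PySem.Str.len ls + 1))) (some i))) (some (PySem.Str.len ls)) none == g)) : Int) := by
  have hlen : PySem.Str.len (ls ++ g) = PySem.Str.len ls + 1 := by
    rw [PySem.Str.len_append, hg1]
  rw [pv_calc_shows, hlen]
  exact congrArg _ (List.countP_congr (fun i _ => by rw [pv_eq_append_bool _ ls g]))

-- B's tallying loop: the key set never changes …
theorem pv_fold_keys (word : Int → String) (ls : String) (n : Int) :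
    ∀ (L : List Int) (d : PySem.Dict String Int),
      (L.foldl (fun d i =>
        if PySem.Str.startswith (word i) ls then
          let tail := PySem.Str.slice (word i) (some n) none
          if d.contains tail then d.modify tail 0 (· + 1) else d
        else d) d).keys = d.keys := by
  intro L
  induction L with
  | nil => intro d; rfl
  | cons i L ih =>
    intro d
    simp only [List.foldl_cons]
    rw [ih]
    by_cases h1 : PySem.Str.startswith (word i) ls = true
    · rw [if_pos h1]
      by_cases h2 : d.contains (PySem.Str.slice (word i) (some n) none) = true
      · rw [if_pos h2, PySem.Dict.keys_modify, PySem.Dict.keys_insert_of_contains _ _ h2]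
      · rw [if_neg h2]
    · rw [if_neg h1]

-- … and every present key ends up holding its tally of matching window positions.
theorem pv_fold_getD (word : Int → String) (ls : String) (n : Int) :
    ∀ (L : List Int) (d : PySem.Dict String Int) (g : String), d.contains g = true →
      (L.foldl (fun d i =>
        if PySem.Str.startswith (word i) ls then
          let tail := PySem.Str.slice (word i) (some n) none
          if d.contains tail then d.modify tail 0 (· + 1) else d
        else d) d).getD g 0
      = d.getD g 0 + (L.countP (fun i =>
          PySem.Str.startswith (word i) ls && (PySem.Str.slice (word i) (some n) none == g)) : Int) := by
  intro L
  induction L with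
  | nil => intro d g hg; simp
  | cons i L ih =>
    intro d g hg
    simp only [List.foldl_cons, List.countP_cons]
    by_cases h1 : PySem.Str.startswith (word i) ls = true
    · rw [if_pos h1]
      by_cases h2 : d.contains (PySem.Str.slice (word i) (some n) none) = true
      · rw [if_pos h2]
        have hg' : (d.modify (PySem.Str.slice (word i) (some n) none) 0 (· + 1)).contains g = true := by
          rw [PySem.Dict.contains_modify]; simp [hg]
        rw [ih _ _ hg', PySem.Dict.getD_modify]
        by_cases h3 : g = PySem.Str.slice (word i) (some n) none
        · have : (PySem.Str.slice (word i) (some n) none == g) = true := by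
            simp [h3]
          rw [if_pos h3]
          simp only [h1, this, Bool.and_self, if_pos]
          rw [← h3]; push_cast; ring
        · have h4 : ¬ (PySem.Str.startswith (word i) ls && (PySem.Str.slice (word i) (some n) none == g)) = true := by
            simp [beq_iff_eq]; intro _ h; exact h3 h.symm
          rw [if_neg h3, if_neg h4]
          simp
      · have h3 : ¬ (PySem.Str.startswith (word i) ls && (PySem.Str.slice (word i) (some n) none == g)) = true := by
          simp [beq_iff_eq]; intro _ h; rw [h] at h2; exact h2 hg
        rw [if_neg h2, ih _ _ hg, if_neg h3]
        simp
    · have h3 : ¬ (PySem.Str.startswith (word i) ls && (PySem.Str.slice (word i) (some n) none == g)) = true := by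
        simp [beq_iff_eq]; intro h; exact absurd h h1
      rw [if_neg h1, ih _ _ hg, if_neg h3]
      simp

-- A's strict-improvement scan over the three guesses, evaluated.
theorem pv_foldA (f : String → Int) (h : 0 ≤ f "R") :
    (["R","P","S"].foldl (fun gd guess => if f guess > gd.2 then (guess, f guess) else gd) (("" : String), (-1:Int))).1
    = if f "R" < f "P" then (if f "P" < f "S" then "S" else "P") else (if f "R" < f "S" then "S" else "R") := by
  simp only [List.foldl_cons, List.foldl_nil]
  split_ifs <;> simp_all <;> omega

-- B's max over the three keys, evaluated (same first-extremal tie rule).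
theorem pv_maxB (f : String → Int) :
    (PySem.List.max? ["R","P","S"] f).getD ""
    = if f "R" < f "P" then (if f "P" < f "S" then "S" else "P") else (if f "R" < f "S" then "S" else "R") := by
  simp only [PySem.List.max?, List.foldl_cons, List.foldl_nil]
  split_ifs <;> simp_all <;> split_ifs <;> simp_all <;> omega

theorem pv_main (stream : List String) (lookup_len : Int) :
    choose_option stream lookup_len = choose_option_alt stream lookup_len := by
  simp only [choose_option, choose_option_alt]
  generalize PySem.Str.join "" (PySem.List.slice stream (some (-lookup_len)) none) = ls
  rw [pv_fold_keys (fun i => PySem.Str.join "" (PySem.List.slice stream (some (i - (PySem.Str.len ls + 1))) (some i))) ls (PySem.Str.len ls)]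
  have hk : (PySem.Dict.ofList [("R", (0 : Int)), ("P", 0), ("S", 0)]).keys = ["R", "P", "S"] := by decide
  rw [hk]
  rw [pv_foldA (fun g => calculate_shows stream (ls ++ g))
        (by show 0 ≤ calculate_shows stream (ls ++ "R"); rw [pv_calc_shows]; exact Int.natCast_nonneg _)]
  rw [pv_maxB]
  have hR := pv_fold_getD (fun i => PySem.Str.join "" (PySem.List.slice stream (some (i - (PySem.Str.len ls + 1))) (some i))) ls (PySem.Str.len ls) (PySem.List.pyRange (PySem.Str.len ls + 1) ((stream.length : Int) + 1) 1) (PySem.Dict.ofList [("R", (0 : Int)), ("P", 0), ("S", 0)]) "R" (by decide)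
  have hP := pv_fold_getD (fun i => PySem.Str.join "" (PySem.List.slice stream (some (i - (PySem.Str.len ls + 1))) (some i))) ls (PySem.Str.len ls) (PySem.List.pyRange (PySem.Str.len ls + 1) ((stream.length : Int) + 1) 1) (PySem.Dict.ofList [("R", (0 : Int)), ("P", 0), ("S", 0)]) "P" (by decide)
  have hS := pv_fold_getD (fun i => PySem.Str.join "" (PySem.List.slice stream (some (i - (PySem.Str.len ls + 1))) (some i))) ls (PySem.Str.len ls) (PySem.List.pyRange (PySem.Str.len ls + 1) ((stream.length : Int) + 1) 1) (PySem.Dict.ofList [("R", (0 : Int)), ("P", 0), ("S", 0)]) "S" (by decide)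
  have h0R : (PySem.Dict.ofList [("R", (0 : Int)), ("P", 0), ("S", 0)]).getD "R" 0 = 0 := by decide
  have h0P : (PySem.Dict.ofList [("R", (0 : Int)), ("P", 0), ("S", 0)]).getD "P" 0 = 0 := by decide
  have h0S : (PySem.Dict.ofList [("R", (0 : Int)), ("P", 0), ("S", 0)]).getD "S" 0 = 0 := by decide
  have aR := pv_countA stream ls "R" (by decide)
  have aP := pv_countA stream ls "P" (by decide)
  have aS := pv_countA stream ls "S" (by decide)
  simp only [aR, aP, aS, hR, hP, hS, h0R, h0P, h0S, zero_add]

-- ===== VERDICT (by name: the statement is the Claim_ definition above) =====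
theorem choose_option_spec : Claim_equal_choose_option := by
  intro stream lookup_len _
  unfold Spec_choose_option
  exact pv_main stream lookup_len
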